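-- pv_equiv track=rewrite | github.com/Yoann-Merle/AOC | 2022/01/main.py | split_by_empty_line
-- ===== SOURCE A (Python) =====
-- def split_by_empty_line(lines):
--     blocks = []
--     block = []
--     for line in lines:
--         if line == '':
--             blocks.append(block)
--             block = []
--         else:
--             block.append(int(line))
--
--
--     return blocks
-- ===== SOURCE B (Python) =====
-- def split_by_empty_line(lines):
--     parsed = [None if line == '' else int(line) for line in lines]
--     blocks = []
--     rest = parsed
--     while None in rest:
--         i = rest.index(None)
--         blocks.append(rest[:i])
--         rest = rest[i + 1:]
--     return blocks
-- ===== Notes on version B (the rewrite author's own statement) =====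
-- stated objective: alternative
-- what changed: B first parses every line into a list of Optional ints (None for empty lines), then repeatedly locates the next None with index and slices the block before it, instead of A's per-line state machine with a pending-block accumulator; the tail after the last delimiter is sliced off, never emitted.
import Mathlib
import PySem

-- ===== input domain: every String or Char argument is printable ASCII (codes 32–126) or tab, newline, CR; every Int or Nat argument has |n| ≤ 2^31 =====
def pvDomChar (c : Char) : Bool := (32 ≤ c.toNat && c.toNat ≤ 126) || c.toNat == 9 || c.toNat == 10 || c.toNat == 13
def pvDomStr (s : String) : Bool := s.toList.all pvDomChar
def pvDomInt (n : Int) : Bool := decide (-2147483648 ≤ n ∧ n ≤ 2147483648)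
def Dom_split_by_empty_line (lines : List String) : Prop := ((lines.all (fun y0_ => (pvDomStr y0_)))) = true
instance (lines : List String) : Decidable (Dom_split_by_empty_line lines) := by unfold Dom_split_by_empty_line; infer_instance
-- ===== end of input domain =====

-- B replaces A's per-line accumulator state machine by a split-at-first-delimiter loop
-- (alternative decomposition, same return value; no speed claim).


-- ===== PORT A =====
-- int(line); Pre_ guarantees the parse succeeds, so the default is never taken inside Pre_
def pvParse (l : String) : Int := (PySem.Int.ofStr? l).getD 0

def split_by_empty_line (lines : List String) : List (List Int) :=
  (lines.foldl
    (fun (st : List (List Int) × List Int) line =>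
      if line == "" then (st.1 ++ [st.2], [])
      else (st.1, st.2 ++ [pvParse line]))
    ([], [])).1

-- ===== PORT B =====
-- parsed = [None if line == '' else int(line) for line in lines]  (parse every line first)
def pvParseLine (line : String) : Option Int :=
  if line == "" then none else some (pvParse line)

-- while None in rest: i = rest.index(None); append rest[:i]; rest = rest[i+1:]
def pvAltGo (blocks : List (List Int)) (rest : List (Option Int)) : List (List Int) :=
  if h : none ∈ rest then
    pvAltGo (blocks ++ [(rest.take (rest.idxOf none)).reduceOption]) (rest.drop (rest.idxOf none + 1))
  else blocks
termination_by rest.length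
decreasing_by
  have hpos : 0 < rest.length := List.length_pos_of_mem h
  simp [List.length_drop]; omega

def split_by_empty_line_alt (lines : List String) : List (List Int) :=
  pvAltGo [] (lines.map pvParseLine)

-- ===== PRECONDITION & SPEC =====
-- Pre_ excludes exactly the inputs on which Python A raises ValueError: a non-empty line
-- anywhere (including the dropped trailing block) that int() cannot parse.
def Pre_split_by_empty_line (lines : List String) : Prop :=
  ∀ l ∈ lines, l ≠ "" → (PySem.Int.ofStr? l).isSome = true
instance (lines : List String) : Decidable (Pre_split_by_empty_line lines) := by
  unfold Pre_split_by_empty_line; infer_instance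
def pvWitness_split_by_empty_line : List String := ["1", "-2", "", " 7 ", "", "+5"]

def Spec_split_by_empty_line (lines : List String) (out : List (List Int)) : Prop := out = split_by_empty_line_alt lines
instance (lines : List String) (out : List (List Int)) : Decidable (Spec_split_by_empty_line lines out) := by unfold Spec_split_by_empty_line; infer_instance

-- ===== CLAIM (what is proved, stated in full; the proofs are below) =====
def Claim_equal_split_by_empty_line : Prop := ∀ (lines : List String), Dom_split_by_empty_line lines → Pre_split_by_empty_line lines → Spec_split_by_empty_line lines (split_by_empty_line lines)

-- ===== LEMMAS AND PROOFS =====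

-- A's fold from an arbitrary state equals B's delimiter loop from the corresponding state.
theorem pv_key (lines : List String) : ∀ (bs : List (List Int)) (b : List Int),
    (lines.foldl
      (fun (st : List (List Int) × List Int) line =>
        if line == "" then (st.1 ++ [st.2], [])
        else (st.1, st.2 ++ [pvParse line]))
      (bs, b)).1 =
    (if none ∈ lines.map pvParseLine then
      pvAltGo (bs ++ [b ++ ((lines.map pvParseLine).take ((lines.map pvParseLine).idxOf none)).reduceOption])
              ((lines.map pvParseLine).drop ((lines.map pvParseLine).idxOf none + 1))
    else bs) := by
  induction lines with
  | nil => intro bs b; simp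
  | cons l rest ih =>
    intro bs b
    by_cases hl : l = ""
    · subst hl
      have hf : pvParseLine "" = none := rfl
      simp only [List.foldl_cons, beq_self_eq_true, if_true, List.map_cons, hf,
        List.idxOf_cons_self, List.take_zero, List.reduceOption_nil, List.append_nil,
        List.drop_succ_cons, List.drop_zero, List.mem_cons, true_or, if_true]
      rw [ih]
      conv_rhs => rw [pvAltGo]
      by_cases hr : none ∈ rest.map pvParseLine
      · simp [hr]
      · simp [hr]
    · have hbeq : (l == "") = false := by simpa using hl
      have hf : pvParseLine l = some (pvParse l) := by simp [pvParseLine, hbeq]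
      simp only [List.foldl_cons, hbeq, Bool.false_eq_true, if_false]
      rw [ih]
      by_cases hr : none ∈ rest.map pvParseLine
      · have hmem : none ∈ (l :: rest).map pvParseLine := by simp [hf, hr]
        have hidx : ((l :: rest).map pvParseLine).idxOf none
            = (rest.map pvParseLine).idxOf none + 1 := by
          simp [hf]
        rw [if_pos hr, if_pos hmem, hidx]
        simp [hf]
      · have hmem : none ∉ (l :: rest).map pvParseLine := by simp [hf, hr]
        rw [if_neg hr, if_neg hmem]

theorem pv_ab (lines : List String) : split_by_empty_line lines = split_by_empty_line_alt lines := by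
  unfold split_by_empty_line split_by_empty_line_alt
  rw [pv_key]
  conv_rhs => rw [pvAltGo]
  by_cases hr : none ∈ lines.map pvParseLine
  · simp [hr]
  · simp [hr]

-- ===== VERDICT (by name: the statement is the Claim_ definition above) =====
theorem split_by_empty_line_spec : Claim_equal_split_by_empty_line := by
  intro lines _ _
  unfold Spec_split_by_empty_line
  exact pv_ab lines
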